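-- pv_equiv track=rewrite | github.com/jiatongw/notes | code/enhance_one_two_pointers/element_deduplication.py | remove3Correct
-- ===== SOURCE A (Python) =====
-- def remove3Correct(l):
--     if not l:
--         return []
--
--     slow = fast1 = fast2 = 0
--
--     while fast2 < len(l):
--         while fast2 < len(l) and l[fast2] == l[fast1]:
--             fast2 += 1
--
--         if fast2 - fast1 == 1:
--             l[slow] = l[fast1]
--             slow += 1
--
--         fast1 = fast2
--
--     return l[:slow]
-- ===== SOURCE B (Python) =====
-- def remove3Correct(l):
--     if not l:
--         return []
--     n = len(l)
--     kept = [l[i] for i in range(n)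
--             if (i == 0 or l[i] != l[i - 1]) and (i == n - 1 or l[i] != l[i + 1])]
--     l[:len(kept)] = kept
--     return kept
-- ===== Notes on version B (the rewrite author's own statement) =====
-- stated objective: simpler
-- what changed: Replaces A's nested two-pointer run-advancing while loops and in-place compaction bookkeeping with one flat comprehension keeping l[i] exactly when it differs from both neighbours, then a single slice assignment reproducing A's prefix mutation.
import Mathlib
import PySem

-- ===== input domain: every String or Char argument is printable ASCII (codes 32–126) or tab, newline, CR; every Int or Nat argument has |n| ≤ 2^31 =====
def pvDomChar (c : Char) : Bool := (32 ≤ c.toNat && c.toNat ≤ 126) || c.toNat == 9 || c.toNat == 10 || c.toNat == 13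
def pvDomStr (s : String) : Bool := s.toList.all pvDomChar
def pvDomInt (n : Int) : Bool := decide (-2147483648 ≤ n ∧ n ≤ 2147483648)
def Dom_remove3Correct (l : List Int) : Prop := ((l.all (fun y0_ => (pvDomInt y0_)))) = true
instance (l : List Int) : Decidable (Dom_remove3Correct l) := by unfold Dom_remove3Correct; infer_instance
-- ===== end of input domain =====

-- B replaces A's two-pointer run scan by one flat look-both-ways pass (same O(n) cost, simpler);
-- both mutate the list's prefix identically in Python, and the theorem is about the return value.

-- ===== PORT A =====
-- inner while: 'while fast2 < len(l) and l[fast2] == l[fast1]: fast2 += 1'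
-- (reads are in range whenever the guard holds, so getD reads the exact Python value)
def innerA (l : List Int) (fast1 fast2 : Nat) : Nat :=
  if fast2 < l.length ∧ l.getD fast2 0 = l.getD fast1 0 then innerA l fast1 (fast2 + 1) else fast2
termination_by l.length - fast2

theorem innerA_ge (l : List Int) (f1 f2 : Nat) : f2 ≤ innerA l f1 f2 := by
  rw [innerA]
  split
  · rename_i hc
    have := innerA_ge l f1 (f2 + 1)
    omega
  · exact le_refl _
termination_by l.length - f2
decreasing_by omega

theorem innerA_gt_self (l : List Int) (f : Nat) (h : f < l.length) : f + 1 ≤ innerA l f f := by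
  rw [innerA, if_pos ⟨h, rfl⟩]
  exact innerA_ge l f (f + 1)

-- outer while, with slow/fast1/fast2 as state; at every entry of the outer loop body the
-- Python invariantly has fast1 = fast2 (both 0 initially, both set to the inner result after),
-- so the state is (l, slow, f) with f = fast1 = fast2.
def goA (l : List Int) (slow f : Nat) : List Int × Nat :=
  if h : f < l.length then
    let f2 := innerA l f f
    if f2 - f = 1 then goA (l.set slow (l.getD f 0)) (slow + 1) f2
    else goA l slow f2
  else (l, slow)
termination_by l.length - f
decreasing_by
  · simp only [List.length_set]
    have := innerA_gt_self l f h; omega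
  · have := innerA_gt_self l f h; omega

def remove3Correct (l : List Int) : List Int :=
  if l = [] then []
  else
    let r := goA l 0 0
    r.1.take r.2

-- ===== PORT B =====
def remove3Correct_alt (l : List Int) : List Int :=
  if l = [] then []
  else
    ((List.range l.length).filter (fun i =>
        (i == 0 || !(l.getD i 0 == l.getD (i - 1) 0)) &&
        (i == l.length - 1 || !(l.getD i 0 == l.getD (i + 1) 0)))).map
      (fun i => l.getD i 0)

-- ===== PRECONDITION & SPEC =====
def Spec_remove3Correct (l : List Int) (out : List Int) : Prop := out = remove3Correct_alt l
instance (l : List Int) (out : List Int) : Decidable (Spec_remove3Correct l out) := by unfold Spec_remove3Correct; infer_instance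

-- ===== CLAIM (what is proved, stated in full; the proofs are below) =====
def Claim_equal_remove3Correct : Prop := ∀ (l : List Int), Dom_remove3Correct l → Spec_remove3Correct l (remove3Correct l)

-- ===== LEMMAS AND PROOFS =====

-- elements of the run scanned by innerA are all equal to l[fast1]
theorem innerA_run (l : List Int) (f1 f2 : Nat) (i : Nat) (h1 : f2 ≤ i)
    (h2 : i < innerA l f1 f2) : l.getD i 0 = l.getD f1 0 := by
  rw [innerA] at h2
  split at h2
  · rename_i hc
    rcases Nat.eq_or_lt_of_le h1 with rfl | hlt
    · exact hc.2
    · exact innerA_run l f1 (f2 + 1) i hlt h2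
  · omega
termination_by l.length - f2
decreasing_by
  rename_i hc; exact Nat.sub_lt_sub_left hc.1 (Nat.lt_succ_self f2)

-- where innerA stops, the guard fails
theorem innerA_stop (l : List Int) (f1 f2 : Nat) :
    ¬(innerA l f1 f2 < l.length ∧ l.getD (innerA l f1 f2) 0 = l.getD f1 0) := by
  rw [innerA]
  split
  · exact innerA_stop l f1 (f2 + 1)
  · rename_i hc
    exact hc
termination_by l.length - f2
decreasing_by
  rename_i hc; exact Nat.sub_lt_sub_left hc.1 (Nat.lt_succ_self f2)

theorem innerA_le (l : List Int) (f1 f2 : Nat) (h : f2 ≤ l.length) :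
    innerA l f1 f2 ≤ l.length := by
  rw [innerA]
  split
  · rename_i hc
    exact innerA_le l f1 (f2 + 1) hc.1
  · exact h
termination_by l.length - f2
decreasing_by
  rename_i hc; exact Nat.sub_lt_sub_left hc.1 (Nat.lt_succ_self f2)

-- innerA only reads indices ≥ min f1 f2, so lists agreeing there give equal results
theorem innerA_congr (l L : List Int) (m : Nat) (hlen : l.length = L.length)
    (hag : ∀ i, m ≤ i → l.getD i 0 = L.getD i 0) (f1 f2 : Nat)
    (h1 : m ≤ f1) (h2 : m ≤ f2) : innerA l f1 f2 = innerA L f1 f2 := by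
  rw [innerA]
  have hg : (f2 < l.length ∧ l.getD f2 0 = l.getD f1 0) ↔
      (f2 < L.length ∧ L.getD f2 0 = L.getD f1 0) := by
    rw [hlen, hag f2 h2, hag f1 h1]
  split
  · rename_i hc
    conv_rhs => rw [innerA]
    rw [if_pos (hg.mp hc)]
    exact innerA_congr l L m hlen hag f1 (f2 + 1) h1 (by omega)
  · rename_i hc
    conv_rhs => rw [innerA]
    rw [if_neg (fun h => hc (hg.mpr h))]
termination_by l.length - f2
decreasing_by
  rename_i hc; exact Nat.sub_lt_sub_left hc.1 (Nat.lt_succ_self f2)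

-- the run-by-run specification both ports compute
def AK (L : List Int) (f : Nat) : List Int :=
  if h : f < L.length then
    (if innerA L f f - f = 1 then [L.getD f 0] else []) ++ AK L (innerA L f f)
  else []
termination_by L.length - f
decreasing_by
  have := innerA_gt_self L f h; omega

theorem getD_prefix (K L : List Int) (i : Nat) (h : K.length ≤ i) :
    (K ++ L.drop K.length).getD i 0 = L.getD i 0 := by
  simp only [List.getD_eq_getElem?_getD, List.getElem?_append_right h, List.getElem?_drop]
  congr 2
  omega

-- A's outer loop: the mutated list is K ++ (untouched suffix), and the kept prefix is K ++ AK L f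
theorem goA_spec (L K : List Int) (f : Nat) (hK : K.length ≤ f) (hKL : K.length ≤ L.length) :
    ((goA (K ++ L.drop K.length) K.length f).1).take
      (goA (K ++ L.drop K.length) K.length f).2 = K ++ AK L f := by
  have hlen : (K ++ L.drop K.length).length = L.length := by
    simp; omega
  rw [goA]
  by_cases hf : f < L.length
  · rw [dif_pos (by rw [hlen]; exact hf)]
    have hag : ∀ i, K.length ≤ i → (K ++ L.drop K.length).getD i 0 = L.getD i 0 :=
      fun i hi => getD_prefix K L i hi
    have hinner : innerA (K ++ L.drop K.length) f f = innerA L f f :=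
      innerA_congr _ L K.length hlen hag f f hK hK
    simp only [hinner]
    rw [AK, dif_pos hf]
    set f2 := innerA L f f with hf2
    have hgt : f + 1 ≤ f2 := innerA_gt_self L f hf
    have hle : f2 ≤ L.length := innerA_le L f f (le_of_lt hf)
    by_cases h1 : f2 - f = 1
    · rw [if_pos h1, if_pos h1]
      have hf2e : f2 = f + 1 := by omega
      have hv : (K ++ L.drop K.length).getD f 0 = L.getD f 0 := hag f hK
      have hset : (K ++ L.drop K.length).set K.length ((K ++ L.drop K.length).getD f 0)
          = (K ++ [L.getD f 0]) ++ L.drop (K ++ [L.getD f 0]).length := by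
        rw [hv]
        have hne : L.drop K.length ≠ [] := by
          intro h; have := congrArg List.length h; simp at this; omega
        obtain ⟨a, t, hat⟩ := List.exists_cons_of_ne_nil hne
        have ht : t = L.drop (K.length + 1) := by
          have := congrArg List.tail hat
          simpa [List.tail_drop] using this.symm
        rw [List.set_append_right _ _ (le_refl _)]
        simp [hat, ht]
      rw [hset]
      have := goA_spec L (K ++ [L.getD f 0]) f2 (by simp; omega) (by simp; omega)
      simp only [List.length_append, List.length_cons, List.length_nil] at this ⊢
      rw [this]
      simp
    · rw [if_neg h1, if_neg h1]
      have := goA_spec L K f2 (by omega) hKL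
      rw [this]
      simp
  · rw [dif_neg (by rw [hlen]; exact hf)]
    rw [AK, dif_neg hf]
    simpa using List.take_left (l₁ := K) (l₂ := L.drop K.length)
termination_by L.length - f
decreasing_by
  · have := innerA_gt_self L f hf; omega
  · have := innerA_gt_self L f hf; omega

-- B's neighbour test, over a fixed list
def condB (L : List Int) (i : Nat) : Bool :=
  (i == 0 || !(L.getD i 0 == L.getD (i - 1) 0)) &&
  (i == L.length - 1 || !(L.getD i 0 == L.getD (i + 1) 0))

-- B's look-both-ways filter, started at any run start f, equals the run spec AK
theorem filterB_spec (L : List Int) (f : Nat)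
    (hstart : f = 0 ∨ L.length ≤ f ∨ L.getD f 0 ≠ L.getD (f - 1) 0) :
    ((List.range' f (L.length - f)).filter (condB L)).map (fun i => L.getD i 0) = AK L f := by
  by_cases hf : f < L.length
  · rw [AK, dif_pos hf]
    set f2 := innerA L f f with hf2
    have hgt : f + 1 ≤ f2 := innerA_gt_self L f hf
    have hle : f2 ≤ L.length := innerA_le L f f (le_of_lt hf)
    have hrun : ∀ i, f ≤ i → i < f2 → L.getD i 0 = L.getD f 0 :=
      fun i h1 h2 => innerA_run L f f i h1 h2
    have hstop : ¬(f2 < L.length ∧ L.getD f2 0 = L.getD f 0) := innerA_stop L f f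
    have hsplit : List.range' f (L.length - f) =
        List.range' f (f2 - f) ++ List.range' f2 (L.length - f2) := by
      have h1 : L.length - f = (f2 - f) + (L.length - f2) := by omega
      have h2 : f + 1 * (f2 - f) = f2 := by omega
      rw [h1, ← List.range'_append, h2]
    rw [hsplit, List.filter_append, List.map_append]
    have hrec : ((List.range' f2 (L.length - f2)).filter (condB L)).map
        (fun i => L.getD i 0) = AK L f2 := by
      apply filterB_spec
      by_cases hf2L : f2 < L.length
      · right; right
        have h1 : L.getD f2 0 ≠ L.getD f 0 := fun h => hstop ⟨hf2L, h⟩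
        have h2 : L.getD (f2 - 1) 0 = L.getD f 0 := hrun (f2 - 1) (by omega) (by omega)
        rw [h2]; exact h1
      · right; left; omega
    rw [hrec]
    congr 1
    by_cases h1 : f2 - f = 1
    · rw [if_pos h1]
      have hf2e : f2 = f + 1 := by omega
      have : List.range' f (f2 - f) = [f] := by rw [h1]; rfl
      rw [this]
      have hcond : condB L f = true := by
        unfold condB
        have hleft : (f == 0 || !(L.getD f 0 == L.getD (f - 1) 0)) = true := by
          rcases hstart with h | h | h
          · simp [h]
          · omega
          · simp only [List.getD_eq_getElem?_getD] at h
            simp [h]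
        have hright : (f == L.length - 1 || !(L.getD f 0 == L.getD (f + 1) 0)) = true := by
          by_cases hE : f + 1 = L.length
          · have : f = L.length - 1 := by omega
            simp [this]
          · have hlt : f + 1 < L.length := by omega
            have : L.getD (f + 1) 0 ≠ L.getD f 0 := by
              rw [← hf2e] at hlt ⊢
              exact fun h => hstop ⟨hlt, h⟩
            simp only [List.getD_eq_getElem?_getD] at this
            simp [Ne.symm this]
        rw [hleft, hright]; rfl
      simp [hcond]
    · rw [if_neg h1]
      have hnone : ∀ i ∈ List.range' f (f2 - f), condB L i = false := by
        intro i hi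
        rw [List.mem_range'] at hi
        obtain ⟨j, hj1, hj2⟩ := hi
        have hiran : f ≤ i ∧ i < f2 := by omega
        unfold condB
        by_cases hif : i = f
        · have hR : (i == L.length - 1 || !(L.getD i 0 == L.getD (i + 1) 0)) = false := by
            have hne : i ≠ L.length - 1 := by omega
            have heq : L.getD (i + 1) 0 = L.getD i 0 := by
              rw [hif]
              exact hrun (f + 1) (by omega) (by omega)
            simp only [List.getD_eq_getElem?_getD] at heq
            simp [hne, heq]
          rw [hR]; simp
        · have hL : (i == 0 || !(L.getD i 0 == L.getD (i - 1) 0)) = false := by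
            have hne : i ≠ 0 := by omega
            have h1 : L.getD (i - 1) 0 = L.getD f 0 := hrun (i - 1) (by omega) (by omega)
            have h2 : L.getD i 0 = L.getD f 0 := hrun i (by omega) (by omega)
            simp only [List.getD_eq_getElem?_getD] at h1 h2
            simp [hne, h1, h2]
          rw [hL]; simp
      rw [List.filter_eq_nil_iff.mpr (fun a ha => by simp [hnone a ha])]
      rfl
  · rw [AK, dif_neg hf]
    have : L.length - f = 0 := by omega
    rw [this]
    rfl
termination_by L.length - f
decreasing_by
  have := innerA_gt_self L f hf; omega

-- ===== VERDICT (by name: the statement is the Claim_ definition above) =====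
theorem remove3Correct_spec : Claim_equal_remove3Correct := by
  intro l _
  unfold Spec_remove3Correct remove3Correct remove3Correct_alt
  by_cases hnil : l = []
  · simp [hnil]
  · rw [if_neg hnil, if_neg hnil]
    have hA := goA_spec l [] 0 (by simp) (by simp)
    simp only [List.length_nil, List.nil_append, List.drop_zero] at hA
    have hB := filterB_spec l 0 (Or.inl rfl)
    rw [hA]
    rw [List.range_eq_range']
    simp only [Nat.sub_zero] at hB
    rw [← hB]
    rfl
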